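-- pv_equiv track=rewrite | github.com/jm-observer/douyin-downloader | downloader.py | _get_best_quality_url
-- ===== SOURCE A (Python) =====
-- from typing import Dict, List, Optional, Tuple, Any
--
-- def _get_best_quality_url(url_list: List[str]) -> Optional[str]:
--     """获取最高质量的URL"""
--     if not url_list:
--         return None
--
--     # 优先选择包含特定关键词的URL
--     for keyword in ['1080', 'origin', 'high']:
--         for url in url_list:
--             if keyword in url:
--                 return url
--
--     # 返回第一个
--     return url_list[0]
-- ===== SOURCE B (Python) =====
-- def _get_best_quality_url(url_list):
--     """获取最高质量的URL"""
--     if not url_list: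
--         return None
--     # single pass: keep the first URL with the lowest keyword priority
--     best_url, best_prio = url_list[0], 3
--     for url in url_list:
--         prio = _priority(url)
--         if prio < best_prio:
--             best_url, best_prio = url, prio
--     return best_url
--
-- def _priority(url):
--     for i, kw in enumerate(('1080', 'origin', 'high')):
--         if kw in url:
--             return i
--     return 3
-- ===== Notes on version B (the rewrite author's own statement) =====
-- stated objective: alternative
-- what changed: Replaces the three sequential keyword scans over the list with a single pass that assigns each URL a priority (lowest matching keyword index, sentinel 3) and keeps the first URL of minimal priority.
import Mathlib
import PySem

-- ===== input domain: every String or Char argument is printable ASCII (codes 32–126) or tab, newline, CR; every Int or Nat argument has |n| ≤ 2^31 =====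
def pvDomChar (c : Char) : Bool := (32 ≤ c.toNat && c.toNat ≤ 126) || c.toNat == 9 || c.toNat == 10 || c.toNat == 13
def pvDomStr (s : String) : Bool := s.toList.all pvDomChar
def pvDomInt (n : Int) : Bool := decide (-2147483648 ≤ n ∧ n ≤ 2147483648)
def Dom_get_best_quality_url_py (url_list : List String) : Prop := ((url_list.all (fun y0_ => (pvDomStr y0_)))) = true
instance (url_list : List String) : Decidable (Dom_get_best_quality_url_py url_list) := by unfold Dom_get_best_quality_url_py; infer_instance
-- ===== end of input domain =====

-- B replaces A's three sequential keyword scans by one pass keeping the first URL of minimal keyword priority (objective: alternative).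

-- ===== PORT A =====
-- outer 'for keyword in [...]' loop; the inner 'for url in url_list: if keyword in url: return url' is find?
def pvKwLoop : List String → List String → Option String
  | [], _ => none
  | kw :: kws, urls =>
    match urls.find? (fun u => PySem.Str.isIn kw u) with
    | some u => some u
    | none => pvKwLoop kws urls

def get_best_quality_url_py (url_list : List String) : Option String :=
  if url_list = [] then none
  else
    match pvKwLoop ["1080", "origin", "high"] url_list with
    | some u => some u
    | none => url_list[0]?

-- ===== PORT B =====
-- _priority: loop over enumerate(('1080','origin','high'))
def pvPrioGo : List (Int × String) → String → Int
  | [], _ => 3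
  | p :: rest, u => if PySem.Str.isIn p.2 u then p.1 else pvPrioGo rest u

def pvPriority (u : String) : Int :=
  pvPrioGo (PySem.List.enumerate ["1080", "origin", "high"] 0) u

def get_best_quality_url_py_alt (url_list : List String) : Option String :=
  match url_list with
  | [] => none
  | u0 :: _ =>
    some (url_list.foldl
      (fun (b : String × Int) url =>
        let p := pvPriority url
        if p < b.2 then (url, p) else b)
      (u0, 3)).1

-- ===== PRECONDITION & SPEC =====
def Spec_get_best_quality_url_py (url_list : List String) (out : Option String) : Prop := out = get_best_quality_url_py_alt url_list
instance (url_list : List String) (out : Option String) : Decidable (Spec_get_best_quality_url_py url_list out) := by unfold Spec_get_best_quality_url_py; infer_instance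

-- ===== CLAIM (what is proved, stated in full; the proofs are below) =====
def Claim_equal_get_best_quality_url_py : Prop := ∀ (url_list : List String), Dom_get_best_quality_url_py url_list → Spec_get_best_quality_url_py url_list (get_best_quality_url_py url_list)

-- ===== LEMMAS AND PROOFS =====

-- minimal priority over a list, capped at p
def pvM (p : Int) (l : List String) : Int := l.foldl (fun a u => min a (pvPriority u)) p

theorem pvPriority_eq (u : String) :
    pvPriority u =
      if PySem.Str.isIn "1080" u then 0
      else if PySem.Str.isIn "origin" u then 1
      else if PySem.Str.isIn "high" u then 2 else 3 := by
  simp only [pvPriority, PySem.List.enumerate, pvPrioGo]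
  split_ifs <;> rfl

theorem pvPriority_bounds (u : String) : 0 ≤ pvPriority u ∧ pvPriority u ≤ 3 := by
  rw [pvPriority_eq]; split_ifs <;> omega

theorem pvIsIn_1080 (u : String) : PySem.Str.isIn "1080" u = (pvPriority u == 0) := by
  rw [pvPriority_eq]; split_ifs <;> simp_all

theorem pvIsIn_origin (u : String) (h : pvPriority u ≠ 0) :
    PySem.Str.isIn "origin" u = (pvPriority u == 1) := by
  rw [pvPriority_eq] at *; split_ifs at * <;> simp_all

theorem pvIsIn_high (u : String) (h0 : pvPriority u ≠ 0) (h1 : pvPriority u ≠ 1) :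
    PySem.Str.isIn "high" u = (pvPriority u == 2) := by
  rw [pvPriority_eq] at *; split_ifs at * <;> simp_all

theorem pvM_le (p : Int) (l : List String) : pvM p l ≤ p := by
  induction l generalizing p with
  | nil => simp [pvM]
  | cons u t ih => simpa [pvM] using le_trans (ih (min p (pvPriority u))) (by omega)

theorem pvM_le_mem (p : Int) (l : List String) (u : String) (hu : u ∈ l) :
    pvM p l ≤ pvPriority u := by
  induction l generalizing p with
  | nil => simp at hu
  | cons v t ih =>
    rcases List.mem_cons.mp hu with rfl | hu
    · calc pvM p (u :: t) = pvM (min p (pvPriority u)) t := by simp [pvM]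
        _ ≤ min p (pvPriority u) := pvM_le _ _
        _ ≤ pvPriority u := by omega
    · simpa [pvM] using ih (min p (pvPriority v)) hu

theorem pvM_mem (p : Int) (l : List String) :
    pvM p l = p ∨ ∃ u ∈ l, pvPriority u = pvM p l := by
  induction l generalizing p with
  | nil => left; simp [pvM]
  | cons u t ih =>
    have h := ih (min p (pvPriority u))
    rcases h with h | ⟨v, hv, hev⟩
    · have h' : List.foldl (fun a u => min a (pvPriority u)) (min p (pvPriority u)) t
          = min p (pvPriority u) := by simpa [pvM] using h
      by_cases hc : pvPriority u ≤ p
      · right; exact ⟨u, by simp, by simp [pvM]; omega⟩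
      · left; simp [pvM]; omega
    · right; exact ⟨v, by simp [hv], by simpa [pvM] using hev⟩

theorem pvFind?_congr {α : Type} (l : List α) (p q : α → Bool)
    (h : ∀ x ∈ l, p x = q x) : l.find? p = l.find? q := by
  induction l with
  | nil => rfl
  | cons a t ih =>
    have ha := h a (by simp)
    simp only [List.find?_cons, ha]
    cases q a with
    | true => rfl
    | false => exact ih (fun x hx => h x (by simp [hx]))

-- the fold keeps the first element achieving the capped minimum
theorem pvFold_char (l : List String) (b : String) (p : Int) :
    l.foldl (fun (b : String × Int) url =>
        let q := pvPriority url
        if q < b.2 then (url, q) else b) (b, p)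
      = (if pvM p l < p
          then (l.find? (fun u => pvPriority u == pvM p l)).getD b
          else b,
         pvM p l) := by
  induction l generalizing b p with
  | nil => simp [pvM]
  | cons u t ih =>
    by_cases hu : pvPriority u < p
    · have hmin : min p (pvPriority u) = pvPriority u := by omega
      have hM : pvM p (u :: t) = pvM (pvPriority u) t := by simp [pvM, hmin]
      have hle := pvM_le (pvPriority u) t
      rcases lt_or_eq_of_le hle with hlt | heq
      · rcases pvM_mem (pvPriority u) t with h | ⟨v, hv, hev⟩
        · omega
        · have hfind : t.find? (fun w => pvPriority w == pvM (pvPriority u) t) ≠ none := by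
            intro hn
            have := List.find?_eq_none.mp hn v hv
            simp [hev] at this
          simp only [List.foldl_cons, if_pos hu, ih, hM, List.find?_cons]
          have hne : (pvPriority u == pvM (pvPriority u) t) = false := by
            simp; omega
          rw [hne]
          simp only [if_pos hlt, if_pos (lt_trans hlt hu)]
          cases hf : t.find? (fun w => pvPriority w == pvM (pvPriority u) t) with
          | none => exact absurd hf hfind
          | some w => simp
      · have hnotlt : ¬ pvM (pvPriority u) t < pvPriority u := by omega
        have hMp : pvM p (u :: t) = pvPriority u := by rw [hM, heq]
        rw [List.foldl_cons]
        simp only [if_pos hu, ih, heq]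
        rw [if_neg (lt_irrefl (pvPriority u)), hMp, if_pos hu,
          List.find?_cons_of_pos (by simp)]
        rfl
    · have hmin : min p (pvPriority u) = p := by omega
      have hM : pvM p (u :: t) = pvM p t := by simp [pvM, hmin]
      simp only [List.foldl_cons, if_neg hu, ih, hM]
      by_cases hlt : pvM p t < p
      · rw [if_pos hlt, if_pos hlt, List.find?_cons_of_neg (by simp; omega)]
      · rw [if_neg hlt, if_neg hlt]

theorem get_best_quality_url_py_spec : Claim_equal_get_best_quality_url_py := by
  intro url_list _
  unfold Spec_get_best_quality_url_py
  cases url_list with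
  | nil => rfl
  | cons u0 t =>
    have hmem := pvM_mem 3 (u0 :: t)
    have hMle := pvM_le 3 (u0 :: t)
    have hlemem : ∀ u ∈ u0 :: t, pvM 3 (u0 :: t) ≤ pvPriority u :=
      fun u hu => pvM_le_mem 3 (u0 :: t) u hu
    have hM0 : 0 ≤ pvM 3 (u0 :: t) := by
      rcases hmem with h | ⟨v, _, hv⟩
      · omega
      · have := pvPriority_bounds v; omega
    have hB : get_best_quality_url_py_alt (u0 :: t) =
        some (if pvM 3 (u0 :: t) < 3
          then ((u0 :: t).find? (fun u => pvPriority u == pvM 3 (u0 :: t))).getD u0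
          else u0) := by
      simp only [get_best_quality_url_py_alt]
      rw [pvFold_char]
    have hA : get_best_quality_url_py (u0 :: t) =
        match (u0 :: t).find? (fun u => PySem.Str.isIn "1080" u) with
        | some u => some u
        | none =>
          match (u0 :: t).find? (fun u => PySem.Str.isIn "origin" u) with
          | some u => some u
          | none =>
            match (u0 :: t).find? (fun u => PySem.Str.isIn "high" u) with
            | some u => some u
            | none => (u0 :: t)[0]? := by
      simp only [get_best_quality_url_py, if_neg (by simp : ¬ (u0 :: t) = ([] : List String)),
        pvKwLoop]
      cases (u0 :: t).find? (fun u => PySem.Str.isIn "1080" u) <;>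
        cases (u0 :: t).find? (fun u => PySem.Str.isIn "origin" u) <;>
          cases (u0 :: t).find? (fun u => PySem.Str.isIn "high" u) <;> rfl
    obtain ⟨M, hMdef⟩ : ∃ M, pvM 3 (u0 :: t) = M := ⟨_, rfl⟩
    rw [hMdef] at hmem hMle hM0 hB
    have hlememM : ∀ u ∈ u0 :: t, M ≤ pvPriority u := by
      intro u hu; have := hlemem u hu; omega
    rw [hA, hB]
    have hf1 : (u0 :: t).find? (fun u => PySem.Str.isIn "1080" u)
        = (u0 :: t).find? (fun u => pvPriority u == 0) :=
      pvFind?_congr _ _ _ (fun u _ => pvIsIn_1080 u)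
    interval_cases M
    · -- M = 0
      rcases hmem with h | ⟨v, hv, hev⟩
      · omega
      · rw [hf1]
        cases hf : (u0 :: t).find? (fun u => pvPriority u == 0) with
        | none =>
          exfalso
          have := List.find?_eq_none.mp hf v hv
          simp [hev] at this
        | some w => simp
    · -- M = 1
      have hno0 : ∀ u ∈ u0 :: t, pvPriority u ≠ 0 := by
        intro u hu h0; have := hlememM u hu; omega
      have h1none : (u0 :: t).find? (fun u => pvPriority u == 0) = none :=
        List.find?_eq_none.mpr (fun u hu => by simp [hno0 u hu])
      rw [hf1, h1none]
      have hf2 : (u0 :: t).find? (fun u => PySem.Str.isIn "origin" u)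
          = (u0 :: t).find? (fun u => pvPriority u == 1) :=
        pvFind?_congr _ _ _ (fun u hu => pvIsIn_origin u (hno0 u hu))
      rcases hmem with h | ⟨v, hv, hev⟩
      · omega
      · rw [hf2]
        cases hf : (u0 :: t).find? (fun u => pvPriority u == 1) with
        | none =>
          exfalso
          have := List.find?_eq_none.mp hf v hv
          simp [hev] at this
        | some w => simp
    · -- M = 2
      have hno0 : ∀ u ∈ u0 :: t, pvPriority u ≠ 0 := by
        intro u hu h0; have := hlememM u hu; omega
      have hno1 : ∀ u ∈ u0 :: t, pvPriority u ≠ 1 := by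
        intro u hu h0; have := hlememM u hu; omega
      have h1none : (u0 :: t).find? (fun u => pvPriority u == 0) = none :=
        List.find?_eq_none.mpr (fun u hu => by simp [hno0 u hu])
      have hf2 : (u0 :: t).find? (fun u => PySem.Str.isIn "origin" u)
          = (u0 :: t).find? (fun u => pvPriority u == 1) :=
        pvFind?_congr _ _ _ (fun u hu => pvIsIn_origin u (hno0 u hu))
      have h2none : (u0 :: t).find? (fun u => pvPriority u == 1) = none :=
        List.find?_eq_none.mpr (fun u hu => by simp [hno1 u hu])
      rw [hf1, h1none, hf2, h2none]
      have hf3 : (u0 :: t).find? (fun u => PySem.Str.isIn "high" u)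
          = (u0 :: t).find? (fun u => pvPriority u == 2) :=
        pvFind?_congr _ _ _ (fun u hu => pvIsIn_high u (hno0 u hu) (hno1 u hu))
      rcases hmem with h | ⟨v, hv, hev⟩
      · omega
      · rw [hf3]
        cases hf : (u0 :: t).find? (fun u => pvPriority u == 2) with
        | none =>
          exfalso
          have := List.find?_eq_none.mp hf v hv
          simp [hev] at this
        | some w => simp
    · -- M = 3
      have hno : ∀ u ∈ u0 :: t, pvPriority u = 3 := by
        intro u hu; have := hlememM u hu; have := (pvPriority_bounds u).2; omega
      have h1none : (u0 :: t).find? (fun u => pvPriority u == 0) = none :=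
        List.find?_eq_none.mpr (fun u hu => by simp [hno u hu])
      have hf2 : (u0 :: t).find? (fun u => PySem.Str.isIn "origin" u)
          = (u0 :: t).find? (fun u => pvPriority u == 1) :=
        pvFind?_congr _ _ _ (fun u hu => pvIsIn_origin u (by simp [hno u hu]))
      have h2none : (u0 :: t).find? (fun u => pvPriority u == 1) = none :=
        List.find?_eq_none.mpr (fun u hu => by simp [hno u hu])
      have hf3 : (u0 :: t).find? (fun u => PySem.Str.isIn "high" u)
          = (u0 :: t).find? (fun u => pvPriority u == 2) :=
        pvFind?_congr _ _ _ (fun u hu => pvIsIn_high u (by simp [hno u hu]) (by simp [hno u hu]))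
      have h3none : (u0 :: t).find? (fun u => pvPriority u == 2) = none :=
        List.find?_eq_none.mpr (fun u hu => by simp [hno u hu])
      rw [hf1, h1none, hf2, h2none, hf3, h3none]
      simp
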